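-- pv_equiv track=rewrite | github.com/korzilla/hupinghomework2 | msweb.py | jishu
-- ===== SOURCE A (Python) =====
-- def jishu(s, data):
--     c = 0  # 记录出现数目
--     # 标志变量，如果s中的数据有在data这一行不存在的，就置0；
--     t = 0
--     for ii in data:  # 数据每一行
--         t = 1
--         for jj in s:  # 对于 s 中的每一个项
--             if not (jj in ii):
--                 t = 0
--                 break
--         c += t  # 如果 s 在这一行存在，c++
--     return c
-- ===== SOURCE B (Python) =====
-- def jishu(s, data):
--     # Inverted index: item -> set of row indices containing it; answer = |intersection|.
--     index = {}
--     for i, row in enumerate(data):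
--         for x in row:
--             index.setdefault(x, set()).add(i)
--     result = set(range(len(data)))
--     for jj in s:
--         result &= index.get(jj, set())
--     return len(result)
-- ===== Notes on version B (the rewrite author's own statement) =====
-- stated objective: alternative
-- what changed: Replaces A's per-row nested membership scans with a single pass building an inverted index (item -> set of row indices) and then intersecting the posting sets of the query items, returning the size of the intersection.
import Mathlib
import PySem

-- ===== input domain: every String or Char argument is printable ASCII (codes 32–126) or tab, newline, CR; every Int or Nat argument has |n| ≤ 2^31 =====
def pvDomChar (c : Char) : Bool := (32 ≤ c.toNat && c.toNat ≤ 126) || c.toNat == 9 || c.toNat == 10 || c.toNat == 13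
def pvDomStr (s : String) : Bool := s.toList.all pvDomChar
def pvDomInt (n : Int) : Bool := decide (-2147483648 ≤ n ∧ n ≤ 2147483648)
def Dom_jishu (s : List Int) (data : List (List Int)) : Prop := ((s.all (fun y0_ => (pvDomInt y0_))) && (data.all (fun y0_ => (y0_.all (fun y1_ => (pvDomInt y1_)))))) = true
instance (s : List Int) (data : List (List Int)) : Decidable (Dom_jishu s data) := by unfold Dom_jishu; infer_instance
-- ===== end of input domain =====

-- B replaces A's nested membership scans by an inverted index (item -> set of row indices)
-- intersected over the query items; the return value is proved equal on all inputs.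

-- ===== PORT A =====
-- inner loop of A: t = 1; for jj in s: if not (jj in ii): t = 0; break
def jishuInnerA (ii : List Int) : List Int → Int
  | [] => 1
  | jj :: rest => if !(ii.contains jj) then 0 else jishuInnerA ii rest

def jishu (s : List Int) (data : List (List Int)) : Int :=
  data.foldl (fun c ii => c + jishuInnerA ii s) 0

-- ===== PORT B =====
-- inner loop of B's index build: index.setdefault(x, set()).add(i) for each x in row i
def pvIdxRow (j : Int) (d : PySem.Dict Int (PySem.Set Int)) (row : List Int) :
    PySem.Dict Int (PySem.Set Int) :=
  row.foldl (fun d x => d.modify x PySem.Set.empty (fun st => PySem.Set.add st j)) d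

def pvIndex (data : List (List Int)) : PySem.Dict Int (PySem.Set Int) :=
  (PySem.List.enumerate data 0).foldl (fun d p => pvIdxRow p.1 d p.2) PySem.Dict.empty

def jishu_alt (s : List Int) (data : List (List Int)) : Int :=
  let index := pvIndex data
  let result := s.foldl (fun r jj => PySem.Set.inter r (index.getD jj PySem.Set.empty))
      (PySem.Set.ofList (PySem.List.pyRange 0 (data.length : Int) 1))
  PySem.Set.len result

-- ===== PRECONDITION & SPEC =====
def Spec_jishu (s : List Int) (data : List (List Int)) (out : Int) : Prop := out = jishu_alt s data
instance (s : List Int) (data : List (List Int)) (out : Int) : Decidable (Spec_jishu s data out) := by unfold Spec_jishu; infer_instance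

-- ===== CLAIM (what is proved, stated in full; the proofs are below) =====
def Claim_equal_jishu : Prop := ∀ (s : List Int) (data : List (List Int)), Dom_jishu s data → Spec_jishu s data (jishu s data)

-- ===== LEMMAS AND PROOFS =====

-- A's inner loop (with its break) is the all-membership test
lemma innerA_eq (ii : List Int) (s : List Int) :
    jishuInnerA ii s = if s.all (fun jj => ii.contains jj) then 1 else 0 := by
  induction s with
  | nil => simp [jishuInnerA]
  | cons jj rest ih =>
      by_cases h : ii.contains jj = true <;> simp [jishuInnerA, ih] <;> simp_all

-- A counts the rows passing the test
lemma jishu_eq_countP (s : List Int) (data : List (List Int)) :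
    jishu s data = (data.countP (fun ii => s.all (fun jj => ii.contains jj)) : Int) := by
  have key : ∀ (l : List (List Int)) (c : Int),
      l.foldl (fun c ii => c + jishuInnerA ii s) c
        = c + (l.countP (fun ii => s.all (fun jj => ii.contains jj)) : Int) := by
    intro l
    induction l with
    | nil => simp
    | cons ii rest ih =>
        intro c
        rw [List.foldl_cons, ih, innerA_eq, List.countP_cons]
        split_ifs <;> push_cast <;> ring
  simpa using key data 0

-- membership in a posting set after indexing one row
lemma mem_pvIdxRow (row : List Int) (d : PySem.Dict Int (PySem.Set Int)) (j x i : Int) :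
    i ∈ (pvIdxRow j d row).getD x PySem.Set.empty ↔
      i ∈ d.getD x PySem.Set.empty ∨ (i = j ∧ x ∈ row) := by
  induction row generalizing d with
  | nil => simp [pvIdxRow]
  | cons y rest ih =>
      show i ∈ (pvIdxRow j (d.modify y PySem.Set.empty (fun st => PySem.Set.add st j)) rest).getD x PySem.Set.empty ↔ _
      rw [ih, PySem.Dict.getD_modify]
      by_cases hxy : x = y
      · subst hxy
        rw [if_pos rfl, PySem.Set.mem_add]
        simp only [List.mem_cons]
        tauto
      · simp only [if_neg hxy, List.mem_cons]
        tauto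

-- membership in a posting set after indexing a list of (index, row) pairs
lemma mem_foldl_pvIdxRow (l : List (Int × List Int)) (d : PySem.Dict Int (PySem.Set Int)) (x i : Int) :
    i ∈ (l.foldl (fun d p => pvIdxRow p.1 d p.2) d).getD x PySem.Set.empty ↔
      i ∈ d.getD x PySem.Set.empty ∨ ∃ p ∈ l, i = p.1 ∧ x ∈ p.2 := by
  induction l generalizing d with
  | nil => simp
  | cons q rest ih =>
      show i ∈ (rest.foldl _ (pvIdxRow q.1 d q.2)).getD x PySem.Set.empty ↔ _
      rw [ih, mem_pvIdxRow]
      simp only [List.mem_cons]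
      constructor
      · rintro ((h | h) | ⟨p, hp, h⟩)
        · exact Or.inl h
        · exact Or.inr ⟨q, Or.inl rfl, h⟩
        · exact Or.inr ⟨p, Or.inr hp, h⟩
      · rintro (h | ⟨p, (rfl | hp), h⟩)
        · exact Or.inl (Or.inl h)
        · exact Or.inl (Or.inr h)
        · exact Or.inr ⟨p, hp, h⟩

-- the inverted index is correct
lemma mem_pvIndex (data : List (List Int)) (x i : Int) :
    i ∈ (pvIndex data).getD x PySem.Set.empty ↔
      ∃ (k : Nat) (_ : k < data.length), i = (k : Int) ∧ x ∈ data[k] := by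
  unfold pvIndex
  rw [mem_foldl_pvIdxRow]
  simp only [PySem.Dict.getD_empty, PySem.Set.empty]
  constructor
  · rintro (h | ⟨p, hp, hi, hx⟩)
    · simp at h
    · obtain ⟨k, hk, rfl⟩ := (PySem.List.mem_enumerate_iff _ _ _).mp hp
      exact ⟨k, hk, by simpa using hi, hx⟩
  · rintro ⟨k, hk, rfl, hx⟩
    exact Or.inr ⟨((k : Int), data[k]), (PySem.List.mem_enumerate_iff _ _ _).mpr ⟨k, hk, by simp⟩, rfl, hx⟩

-- the intersection fold: membership
lemma mem_foldl_inter (s : List Int) (r : PySem.Set Int) (g : Int → PySem.Set Int) (i : Int) :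
    i ∈ s.foldl (fun r jj => PySem.Set.inter r (g jj)) r ↔ i ∈ r ∧ ∀ jj ∈ s, i ∈ g jj := by
  induction s generalizing r with
  | nil => simp
  | cons jj rest ih =>
      rw [List.foldl_cons, ih]
      rw [PySem.Set.mem_inter]
      simp only [List.mem_cons]
      constructor
      · rintro ⟨⟨h1, h2⟩, h3⟩
        exact ⟨h1, fun y hy => hy.elim (fun e => e ▸ h2) (h3 y)⟩
      · rintro ⟨h1, h2⟩
        exact ⟨⟨h1, h2 jj (Or.inl rfl)⟩, fun y hy => h2 y (Or.inr hy)⟩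

-- the intersection fold: no duplicates
lemma nodup_foldl_inter (s : List Int) (r : PySem.Set Int) (g : Int → PySem.Set Int)
    (h : r.Nodup) : (s.foldl (fun r jj => PySem.Set.inter r (g jj)) r).Nodup := by
  induction s generalizing r with
  | nil => exact h
  | cons jj rest ih => exact ih _ (PySem.Set.nodup_inter _ _ h)

-- counting over row indices = counting over rows
lemma countP_range_getD (data : List (List Int)) (p : List Int → Bool) :
    (List.range data.length).countP (fun k => p (data.getD k [])) = data.countP p := by
  induction data using List.reverseRecOn with
  | nil => simp
  | append_singleton xs a ih =>
      rw [List.length_append, List.length_cons, List.length_nil, List.range_succ,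
        List.countP_append, List.countP_append]
      congr 1
      · rw [← ih]
        apply List.countP_congr
        intro k hk
        simp only [List.mem_range] at hk
        simp [List.getD, List.getElem?_append_left hk]
      · simp [List.getD]

-- ===== VERDICT (by name: the statement is the Claim_ definition above) =====
theorem jishu_spec : Claim_equal_jishu := by
  intro s data _
  unfold Spec_jishu jishu_alt
  -- the initial candidate set is the (duplicate-free) list of row indices
  have hinit : PySem.Set.ofList (PySem.List.pyRange 0 (data.length : Int) 1)
      = List.map (fun k : Nat => (k : Int)) (List.range data.length) := by
    rw [PySem.List.pyRange_zero_natCast]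
    apply PySem.Set.ofList_eq_self_of_nodup
    exact List.nodup_range.map (fun a b h => by exact_mod_cast h)
  have hnodupInit : (List.map (fun k : Nat => (k : Int)) (List.range data.length)).Nodup :=
    List.nodup_range.map (fun a b h => by exact_mod_cast h)
  set q : Nat → Bool := fun k => s.all (fun jj => (data.getD k []).contains jj) with hq
  set result := s.foldl (fun r jj => PySem.Set.inter r ((pvIndex data).getD jj PySem.Set.empty))
      (PySem.Set.ofList (PySem.List.pyRange 0 (data.length : Int) 1)) with hres
  -- the result is a permutation of the filtered index list
  have hperm : result.Perm (List.map (fun k : Nat => (k : Int)) ((List.range data.length).filter q)) := by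
    rw [List.perm_ext_iff_of_nodup]
    · intro i
      rw [hres, hinit, mem_foldl_inter]
      constructor
      · rintro ⟨hi, hall⟩
        obtain ⟨k, hk, rfl⟩ := by simpa using hi
        refine List.mem_map.mpr ⟨k, List.mem_filter.mpr ⟨by simpa using hk, ?_⟩, rfl⟩
        rw [hq]
        simp only [List.all_eq_true]
        intro jj hjj
        obtain ⟨k', hk', hkk', hmem⟩ := (mem_pvIndex data jj _).mp (hall jj hjj)
        have : k' = k := by exact_mod_cast hkk'.symm
        subst this
        simpa [List.getD, List.getElem?_eq_getElem hk'] using hmem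
      · intro hi
        obtain ⟨k, hkf, rfl⟩ := List.mem_map.mp hi
        obtain ⟨hk, hqk⟩ := List.mem_filter.mp hkf
        simp only [List.mem_range] at hk
        refine ⟨List.mem_map.mpr ⟨k, List.mem_range.mpr hk, rfl⟩, fun jj hjj => ?_⟩
        rw [mem_pvIndex]
        refine ⟨k, hk, rfl, ?_⟩
        have := (List.all_eq_true.mp hqk) jj hjj
        simpa [List.getD, List.getElem?_eq_getElem hk] using this
    · rw [hres, hinit] at *
      exact nodup_foldl_inter _ _ _ hnodupInit
    · exact (List.nodup_range.filter q).map (fun a b h => by exact_mod_cast h)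
  -- lengths agree
  have hlen : PySem.Set.len result = (((List.range data.length).filter q).length : Int) := by
    have := hperm.length_eq
    simp only [List.length_map] at this
    simp [PySem.Set.len, this]
  rw [hlen, jishu_eq_countP]
  rw [← List.countP_eq_length_filter]
  rw [hq]
  have hcnt := countP_range_getD data (fun ii => s.all fun jj => ii.contains jj)
  exact_mod_cast hcnt.symm
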